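-- pv_equiv track=rewrite | github.com/annajoseph7/MyPythonTask | task.py | Solution
-- ===== SOURCE A (Python) =====
-- def Solution(S, V):   #function accepting 2 arguments(S as R and V as V)
--     a_min = b_min = balance = 0 #initializing the variables
--     for receiver, amount in zip(S, V): #iterate over 2 lists at same time
--         if receiver == 'A': #if the receiver is A
--             balance += amount   #add the amount of balance
--             b_min = min(-balance, b_min) #if the balance is -tive ,the minimun amount is the amount
--         else: #if the receiver is B
--             balance -= amount #subtract the amount from the balance
--             a_min = min(balance, a_min) #if the balance is +tive, then the minimum amount is the amount
--     return [-a_min, -b_min] #return the minimum amount to each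
-- ===== SOURCE B (Python) =====
-- def Solution(S, V):
--     # prefix-table decomposition: build running balances once, then two filtered mins
--     prefix = []
--     bal = 0
--     for r, v in zip(S, V):
--         bal += v if r == 'A' else -v
--         prefix.append(bal)
--     a_min = min([0] + [p for r, p in zip(S, prefix) if r != 'A'])
--     b_min = min([0] + [-p for r, p in zip(S, prefix) if r == 'A'])
--     return [-a_min, -b_min]
-- ===== Notes on version B (the rewrite author's own statement) =====
-- stated objective: alternative
-- what changed: Replaces the single interleaved accumulate-and-track loop with a prefix-balance table built first, then two separate filtered min-reductions over (receiver, prefix) pairs.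
import Mathlib
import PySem

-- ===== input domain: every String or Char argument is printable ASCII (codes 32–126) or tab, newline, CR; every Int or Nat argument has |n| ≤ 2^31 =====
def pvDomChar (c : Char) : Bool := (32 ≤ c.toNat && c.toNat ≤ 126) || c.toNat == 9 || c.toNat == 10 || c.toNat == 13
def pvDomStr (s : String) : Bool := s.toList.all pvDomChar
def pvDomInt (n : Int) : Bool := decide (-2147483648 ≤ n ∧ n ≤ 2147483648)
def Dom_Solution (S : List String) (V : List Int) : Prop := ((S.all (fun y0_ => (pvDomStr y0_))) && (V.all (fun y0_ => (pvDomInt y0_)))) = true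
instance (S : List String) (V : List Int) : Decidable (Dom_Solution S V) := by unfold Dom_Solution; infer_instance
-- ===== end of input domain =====

-- B replaces A's interleaved accumulate-and-track loop by a prefix-balance table plus two filtered min-reductions (alternative decomposition, same cost).

-- ===== PORT A =====
def Solution (S : List String) (V : List Int) : List Int :=
  let st := (S.zip V).foldl
    (fun (st : Int × Int × Int) rv =>
      if rv.1 == "A" then
        (st.1, min (-(st.2.2 + rv.2)) st.2.1, st.2.2 + rv.2)
      else
        (min (st.2.2 - rv.2) st.1, st.2.1, st.2.2 - rv.2))
    (0, 0, 0)
  [-st.1, -st.2.1]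

-- ===== PORT B =====
def Solution_alt (S : List String) (V : List Int) : List Int :=
  let pr := (S.zip V).foldl
    (fun (st : Int × List Int) rv =>
      let bal := st.1 + (if rv.1 == "A" then rv.2 else -rv.2)
      (bal, st.2 ++ [bal]))
    (0, [])
  let aMin := ((S.zip pr.2).filterMap (fun rp => if rp.1 == "A" then none else some rp.2)).foldl min 0
  let bMin := ((S.zip pr.2).filterMap (fun rp => if rp.1 == "A" then some (-rp.2) else none)).foldl min 0
  [-aMin, -bMin]

-- ===== PRECONDITION & SPEC =====
def Spec_Solution (S : List String) (V : List Int) (out : List Int) : Prop := out = Solution_alt S V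
instance (S : List String) (V : List Int) (out : List Int) : Decidable (Spec_Solution S V out) := by unfold Spec_Solution; infer_instance

-- ===== CLAIM (what is proved, stated in full; the proofs are below) =====
def Claim_equal_Solution : Prop := ∀ (S : List String) (V : List Int), Dom_Solution S V → Spec_Solution S V (Solution S V)

-- ===== LEMMAS AND PROOFS =====

-- running balances of the zipped input, starting from bal
def pvPfx : Int → List String → List Int → List Int
  | _, [], _ => []
  | _, _ :: _, [] => []
  | bal, r :: S, v :: V =>
      (bal + (if r == "A" then v else -v)) :: pvPfx (bal + (if r == "A" then v else -v)) S V

-- balances at non-'A' steps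
def pvAList : Int → List String → List Int → List Int
  | _, [], _ => []
  | _, _ :: _, [] => []
  | bal, r :: S, v :: V =>
      if r == "A" then pvAList (bal + v) S V
      else (bal - v) :: pvAList (bal - v) S V

-- negated balances at 'A' steps
def pvBList : Int → List String → List Int → List Int
  | _, [], _ => []
  | _, _ :: _, [] => []
  | bal, r :: S, v :: V =>
      if r == "A" then (-(bal + v)) :: pvBList (bal + v) S V
      else pvBList (bal - v) S V

theorem pvPfx_fold (S : List String) (V : List Int) (bal : Int) (acc : List Int) :
    ((S.zip V).foldl
      (fun (st : Int × List Int) rv =>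
        let b := st.1 + (if rv.1 == "A" then rv.2 else -rv.2)
        (b, st.2 ++ [b])) (bal, acc)).2 = acc ++ pvPfx bal S V := by
  induction S generalizing V bal acc with
  | nil => simp [pvPfx]
  | cons r S ih =>
    cases V with
    | nil => simp [pvPfx]
    | cons v V =>
      simp only [List.zip_cons_cons, List.foldl_cons, pvPfx]
      rw [ih]
      simp

theorem pvA_filter (S : List String) (V : List Int) (bal : Int) :
    (S.zip (pvPfx bal S V)).filterMap (fun rp => if rp.1 == "A" then none else some rp.2)
      = pvAList bal S V := by
  induction S generalizing V bal with
  | nil => simp [pvPfx, pvAList]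
  | cons r S ih =>
    cases V with
    | nil => simp [pvPfx, pvAList]
    | cons v V =>
      by_cases h : r = "A"
      · simpa [pvPfx, pvAList, h] using ih V (bal + v)
      · simpa [pvPfx, pvAList, h, sub_eq_add_neg] using ih V (bal - v)

theorem pvB_filter (S : List String) (V : List Int) (bal : Int) :
    (S.zip (pvPfx bal S V)).filterMap (fun rp => if rp.1 == "A" then some (-rp.2) else none)
      = pvBList bal S V := by
  induction S generalizing V bal with
  | nil => simp [pvPfx, pvBList]
  | cons r S ih =>
    cases V with
    | nil => simp [pvPfx, pvBList]
    | cons v V =>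
      by_cases h : r = "A"
      · simpa [pvPfx, pvBList, h] using ih V (bal + v)
      · simpa [pvPfx, pvBList, h, sub_eq_add_neg] using ih V (bal - v)

-- the final balance of A's loop
def pvFin : Int → List String → List Int → Int
  | bal, [], _ => bal
  | bal, _ :: _, [] => bal
  | bal, r :: S, v :: V =>
      if r == "A" then pvFin (bal + v) S V else pvFin (bal - v) S V

theorem pvA_fold (S : List String) (V : List Int) (a b bal : Int) :
    (S.zip V).foldl
      (fun (st : Int × Int × Int) rv =>
        if rv.1 == "A" then
          (st.1, min (-(st.2.2 + rv.2)) st.2.1, st.2.2 + rv.2)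
        else
          (min (st.2.2 - rv.2) st.1, st.2.1, st.2.2 - rv.2)) (a, b, bal)
      = ((pvAList bal S V).foldl min a, (pvBList bal S V).foldl min b, pvFin bal S V) := by
  induction S generalizing V a b bal with
  | nil => simp [pvAList, pvBList, pvFin]
  | cons r S ih =>
    cases V with
    | nil => simp [pvAList, pvBList, pvFin]
    | cons v V =>
      by_cases h : r = "A"
      · simpa [pvAList, pvBList, pvFin, h, min_comm] using ih V a (min (-(bal + v)) b) (bal + v)
      · simpa [pvAList, pvBList, pvFin, h, min_comm] using ih V (min (bal - v) a) b (bal - v)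

-- ===== VERDICT (by name: the statement is the Claim_ definition above) =====
theorem Solution_spec : Claim_equal_Solution := by
  intro S V _
  show Solution S V = Solution_alt S V
  unfold Solution Solution_alt
  simp only [pvPfx_fold S V 0 [], List.nil_append, pvA_filter, pvB_filter, pvA_fold]
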